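-- pv_equiv track=rewrite | github.com/bssrdf/pyleet | NumberofGreatPartitions.py | countPartitions2
-- ===== SOURCE A (Python) =====
-- from typing import List
--
-- def countPartitions2(nums: List[int], k: int) -> int:
--     n = len(nums)
--     dp = [[0] * (k + 1)] + [[-1] * (k + 1) for _ in range(n)]
--     dp[0][0] = 1
--     def subsetSumCounts(s, idx):
--         if s < 0:
--             return 0
--         if dp[idx][s] < 0:
--             dp[idx][s] = subsetSumCounts(s, idx - 1) + subsetSumCounts(s - nums[idx - 1], idx - 1)
--         return dp[idx][s]
--
--     invalid_pairs = sum([subsetSumCounts(i, n) for i in range(k)]) * 2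
--     return max(2**n - invalid_pairs, 0) % (10**9 + 7)
-- ===== SOURCE B (Python) =====
-- def countPartitions2(nums, k):
--     # Bottom-up subset-sum table (one row of k+1 counts rebuilt per element)
--     # instead of A's memoized recursion over (sum, index); same clamped recurrence.
--     cnt = [1] + [0] * k
--     for num in nums:
--         cnt = [cnt[s] + (cnt[s - num] if 0 <= s - num <= k else 0) for s in range(k + 1)]
--     invalid_pairs = 2 * sum(cnt[:k])
--     return max(2 ** len(nums) - invalid_pairs, 0) % (10 ** 9 + 7)
-- ===== Notes on version B (the rewrite author's own statement) =====
-- stated objective: simpler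
-- what changed: Replaces the memoized top-down recursion over (sum, index) with a bottom-up subset-sum row of k+1 counts rebuilt per element by a list comprehension, keeping the identical closing max/mod formula.
import Mathlib
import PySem

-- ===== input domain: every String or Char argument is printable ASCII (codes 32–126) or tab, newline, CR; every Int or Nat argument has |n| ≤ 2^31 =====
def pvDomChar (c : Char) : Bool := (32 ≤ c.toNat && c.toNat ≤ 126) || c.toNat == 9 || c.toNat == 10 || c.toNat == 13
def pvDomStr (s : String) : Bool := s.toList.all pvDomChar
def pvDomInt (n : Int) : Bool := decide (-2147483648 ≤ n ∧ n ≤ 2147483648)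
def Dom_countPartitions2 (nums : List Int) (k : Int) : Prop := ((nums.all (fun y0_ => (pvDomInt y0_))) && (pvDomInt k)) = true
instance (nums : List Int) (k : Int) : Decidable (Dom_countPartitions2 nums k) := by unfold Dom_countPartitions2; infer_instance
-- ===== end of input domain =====

-- B rebuilds one (k+1)-entry subset-sum row per element (bottom-up, bounds-checked table)
-- instead of A's memoized recursion over (sum, index); same values, objective: simpler.

-- ===== PORT A =====
-- memoized recursion subsetSumCounts(s, idx), threading the dp table as state;
-- the idx = 0 branch under `cur < 0` is unreachable in Python (row 0 is nonnegative)
def aRec (nums : List Int) : Nat → Int → List (List Int) → Int × List (List Int)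
  | idx, s, dp =>
    if s < 0 then (0, dp)
    else
      let cur := PySem.List.pyGetD (dp.getD idx []) s 0
      if cur < 0 then
        match idx with
        | 0 => (cur, dp)
        | j+1 =>
          let r1 := aRec nums j s dp
          let num := PySem.List.pyGetD nums (j : Int) 0
          let r2 := aRec nums j (s - num) r1.2
          let v := r1.1 + r2.1
          (v, r2.2.set (j+1) ((r2.2.getD (j+1) []).set s.toNat v))
      else (cur, dp)

def countPartitions2 (nums : List Int) (k : Int) : Int :=
  let n := nums.length
  let dp : List (List Int) :=
    ((List.replicate (k+1).toNat 0).set 0 1) ::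
      nums.map (fun _ => List.replicate (k+1).toNat (-1))
  let p := (PySem.List.pyRange 0 k 1).foldl
      (fun (acc : Int × List (List Int)) i =>
        let r := aRec nums n i acc.2
        (acc.1 + r.1, r.2)) (0, dp)
  let invalid_pairs := p.1 * 2
  PySem.Int.mod (max (2 ^ n - invalid_pairs) 0) (10 ^ 9 + 7)

-- ===== PORT B =====
def countPartitions2_alt (nums : List Int) (k : Int) : Int :=
  let cnt0 : List Int := 1 :: List.replicate k.toNat 0
  let cnt := nums.foldl (fun c num =>
      (PySem.List.pyRange 0 (k+1) 1).map (fun s =>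
        PySem.List.pyGetD c s 0 +
        (if 0 ≤ s - num ∧ s - num ≤ k then PySem.List.pyGetD c (s - num) 0 else 0))) cnt0
  let invalid_pairs := 2 * (PySem.List.slice cnt none (some k)).sum
  PySem.Int.mod (max (2 ^ nums.length - invalid_pairs) 0) (10 ^ 9 + 7)

-- ===== PRECONDITION & SPEC =====
-- Pre_ is exactly the set of inputs on which the Python A returns: A raises IndexError
-- when k < 0 (dp[0][0] on an empty row) and, for k > 0, when nums contains an element
-- ≤ -2 or two or more elements equal to -1 (a dp column index then exceeds k).
def Pre_countPartitions2 (nums : List Int) (k : Int) : Prop :=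
  0 ≤ k ∧ (k = 0 ∨ ((∀ x ∈ nums, -1 ≤ x) ∧ nums.count (-1) ≤ 1))
instance (nums : List Int) (k : Int) : Decidable (Pre_countPartitions2 nums k) := by
  unfold Pre_countPartitions2; infer_instance

def pvWitness_countPartitions2 : List Int × Int := ([1, -1, 2], 3)

def Spec_countPartitions2 (nums : List Int) (k : Int) (out : Int) : Prop := out = countPartitions2_alt nums k
instance (nums : List Int) (k : Int) (out : Int) : Decidable (Spec_countPartitions2 nums k out) := by unfold Spec_countPartitions2; infer_instance

-- ===== CLAIM (what is proved, stated in full; the proofs are below) =====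
def Claim_equal_countPartitions2 : Prop := ∀ (nums : List Int) (k : Int), Dom_countPartitions2 nums k → Pre_countPartitions2 nums k → Spec_countPartitions2 nums k (countPartitions2 nums k)

-- ===== LEMMAS AND PROOFS =====

-- the clamped subset-sum recurrence both programs compute: gRec k l s, with l the
-- processed elements LAST-first, counts subsets by sum, cutting off outside [0, k]
def gRec (k : Int) : List Int → Int → Int
  | [], s => if s < 0 ∨ k < s then 0 else if s = 0 then 1 else 0
  | x :: rest, s => if s < 0 ∨ k < s then 0 else gRec k rest s + gRec k rest (s - x)

-- same, indexed by the prefix in processing order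
def gP (k : Int) (pref : List Int) (s : Int) : Int := gRec k pref.reverse s

lemma gRec_nonneg (k : Int) (l : List Int) (s : Int) : 0 ≤ gRec k l s := by
  induction l generalizing s with
  | nil => simp only [gRec]; split <;> [omega; (split <;> omega)]
  | cons x rest ih => have h1 := ih s; have h2 := ih (s - x); simp only [gRec]; split <;> omega

lemma gRec_clamp (k : Int) (l : List Int) (s : Int) (h : s < 0 ∨ k < s) : gRec k l s = 0 := by
  cases l <;> simp only [gRec] <;> rw [if_pos h]

lemma gP_nil (k s : Int) : gP k [] s = if s < 0 ∨ k < s then 0 else if s = 0 then 1 else 0 := rfl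

lemma gP_snoc (k : Int) (pref : List Int) (x s : Int) :
    gP k (pref ++ [x]) s = if s < 0 ∨ k < s then 0 else gP k pref s + gP k pref (s - x) := by
  simp only [gP, List.reverse_append, List.reverse_cons, List.reverse_nil, List.nil_append,
    List.cons_append, gRec]

lemma getD_set_self {α : Type} (l : List α) (i : Nat) (x d : α) :
    (l.set i x).getD i d = if i < l.length then x else l.getD i d := by
  rw [List.getD_eq_getElem?_getD, List.getElem?_set, if_pos rfl]
  split
  · rfl
  · rw [Option.getD_none, List.getD_eq_getElem?_getD, List.getElem?_eq_none (by omega),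
      Option.getD_none]

lemma getD_set_ne {α : Type} (l : List α) (i m : Nat) (x d : α) (hne : i ≠ m) :
    (l.set i x).getD m d = l.getD m d := by
  rw [List.getD_eq_getElem?_getD, List.getElem?_set, if_neg hne, ← List.getD_eq_getElem?_getD]

-- ---- B side ----

lemma b_cnt0 (k : Int) (hk : 0 ≤ k) :
    (1 :: List.replicate k.toNat 0 : List Int)
      = (PySem.List.pyRange 0 (k+1) 1).map (fun s => gP k [] s) := by
  rw [PySem.List.pyRange_one_cons (by omega), List.map_cons]
  congr 1
  · rw [gP_nil, if_neg (by omega), if_pos rfl]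
  symm
  rw [List.eq_replicate_iff]
  constructor
  · rw [List.length_map, PySem.List.length_pyRange_one]; omega
  · intro b hb
    simp only [List.mem_map] at hb
    obtain ⟨t, ht, rfl⟩ := hb
    have := (PySem.List.mem_pyRange_one).1 ht
    rw [gP_nil]
    split
    · rfl
    · rw [if_neg (by omega)]

lemma b_step (k : Int) (pref : List Int) (num : Int) :
    ((PySem.List.pyRange 0 (k+1) 1).map (fun s =>
        PySem.List.pyGetD ((PySem.List.pyRange 0 (k+1) 1).map (fun t => gP k pref t)) s 0 +
        (if 0 ≤ s - num ∧ s - num ≤ k then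
          PySem.List.pyGetD ((PySem.List.pyRange 0 (k+1) 1).map (fun t => gP k pref t)) (s - num) 0
         else 0)))
      = (PySem.List.pyRange 0 (k+1) 1).map (fun s => gP k (pref ++ [num]) s) := by
  apply List.map_congr_left
  intro s hs
  have hsr := (PySem.List.mem_pyRange_one).1 hs
  rw [PySem.List.pyGetD_map_pyRange_of_nonneg _ _ _ _ hsr.1 hsr.2, gP_snoc,
    if_neg (show ¬(s < 0 ∨ k < s) by omega)]
  by_cases hcase : 0 ≤ s - num ∧ s - num ≤ k
  · rw [if_pos hcase,
      PySem.List.pyGetD_map_pyRange_of_nonneg _ _ _ _ (by omega) (by omega)]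
  · rw [if_neg hcase]
    simp only [gP]
    rw [gRec_clamp k pref.reverse (s - num) (by omega)]

lemma b_loop (k : Int) (nums : List Int) :
    ∀ (pref : List Int),
      nums.foldl (fun c num =>
        (PySem.List.pyRange 0 (k+1) 1).map (fun s =>
          PySem.List.pyGetD c s 0 +
          (if 0 ≤ s - num ∧ s - num ≤ k then PySem.List.pyGetD c (s - num) 0 else 0)))
        ((PySem.List.pyRange 0 (k+1) 1).map (fun t => gP k pref t))
      = (PySem.List.pyRange 0 (k+1) 1).map (fun t => gP k (pref ++ nums) t) := by
  induction nums with
  | nil => intro pref; simp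
  | cons num rest ih =>
    intro pref
    simp only [List.foldl_cons]
    rw [b_step k pref num, ih (pref ++ [num])]
    simp

-- ---- A side ----

-- memo-table invariant: every relevant row has width k+1, row 0 is exact,
-- rows 1..n are -1 or the correct clamped count
def AInv (nums : List Int) (k : Int) (dp : List (List Int)) : Prop :=
  (∀ i : Nat, i ≤ nums.length → (dp.getD i []).length = (k+1).toNat) ∧
  (∀ s : Int, 0 ≤ s → PySem.List.pyGetD (dp.getD 0 []) s 0 = gP k [] s) ∧
  (∀ i : Nat, 1 ≤ i → i ≤ nums.length → ∀ s : Int, 0 ≤ s → s ≤ k →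
    PySem.List.pyGetD (dp.getD i []) s 0 = -1 ∨
    PySem.List.pyGetD (dp.getD i []) s 0 = gP k (nums.take i) s)

lemma aInv_init (nums : List Int) (k : Int) (hk : 0 ≤ k) :
    AInv nums k (((List.replicate (k+1).toNat 0).set 0 1) ::
      nums.map (fun _ => List.replicate (k+1).toNat (-1))) := by
  refine ⟨?_, ?_, ?_⟩
  · intro i hi
    match i with
    | 0 => simp
    | m+1 =>
      have hm : m < nums.length := by omega
      rw [List.getD_cons_succ, List.getD_eq_getElem?_getD, List.getElem?_map,
        List.getElem?_eq_getElem hm]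
      simp
  · intro s hs
    rw [PySem.List.pyGetD_of_nonneg _ _ hs]
    have hrep : List.replicate (k+1).toNat (0:Int) = 0 :: List.replicate k.toNat 0 := by
      rw [show (k+1).toNat = k.toNat + 1 by omega, List.replicate_succ]
    rw [List.getD_cons_zero, hrep, List.set_cons_zero]
    cases hsn : s.toNat with
    | zero =>
      rw [List.getD_cons_zero, gP_nil, if_neg (by omega), if_pos (by omega)]
    | succ t =>
      have hr : gP k [] s = 0 := by
        rw [gP_nil]
        split
        · rfl
        · rw [if_neg (show ¬ s = 0 by omega)]
      rw [List.getD_cons_succ, hr, List.getD_eq_getElem?_getD, List.getElem?_replicate]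
      split <;> rfl
  · intro i h1 h2 s hs0 hsk
    obtain ⟨m, rfl⟩ : ∃ m, i = m + 1 := ⟨i - 1, by omega⟩
    have hm : m < nums.length := by omega
    rw [PySem.List.pyGetD_of_nonneg _ _ hs0]
    left
    have hrow : ((((List.replicate (k+1).toNat (0:Int)).set 0 1) ::
        nums.map (fun _ => List.replicate (k+1).toNat (-1))).getD (m+1) [])
        = List.replicate (k+1).toNat (-1) := by
      rw [List.getD_cons_succ, List.getD_eq_getElem?_getD, List.getElem?_map,
        List.getElem?_eq_getElem hm]
      rfl
    rw [hrow, List.getD_eq_getElem?_getD, List.getElem?_replicate, if_pos (by omega),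
      Option.getD_some]

lemma aRec_correct (nums : List Int) (k : Int) (hk : 0 ≤ k) :
    ∀ (idx : Nat), idx ≤ nums.length → ∀ (s : Int), ∀ dp, AInv nums k dp →
      (aRec nums idx s dp).1 = gP k (nums.take idx) s ∧ AInv nums k (aRec nums idx s dp).2 := by
  intro idx
  induction idx with
  | zero =>
    intro _ s dp hinv
    by_cases hneg : s < 0
    · rw [aRec]; simp only [if_pos hneg]
      exact ⟨by rw [List.take_zero, gP, gRec_clamp k _ s (Or.inl hneg)], hinv⟩
    · have hcur := hinv.2.1 s (by omega)
      have hnn := gRec_nonneg k ([] : List Int).reverse s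
      rw [gP] at hcur
      rw [aRec]; simp only [if_neg hneg]
      rw [if_neg (by omega)]
      exact ⟨by rw [List.take_zero, gP, hcur], hinv⟩
  | succ j ih =>
    intro hj s dp hinv
    have hjlen : j < nums.length := by omega
    by_cases hneg : s < 0
    · rw [aRec]; simp only [if_pos hneg]
      exact ⟨by rw [gP, gRec_clamp k _ s (Or.inl hneg)], hinv⟩
    by_cases hbig : k < s
    · -- row width k+1: the read is out of range and yields the default 0 = clamped value
      have hlen := hinv.1 (j+1) hj
      have hread : PySem.List.pyGetD (dp.getD (j+1) []) s 0 = 0 := by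
        rw [PySem.List.pyGetD_of_nonneg _ _ (by omega), List.getD_eq_default]
        rw [hlen]; omega
      rw [aRec]; simp only [if_neg hneg, hread]
      rw [if_neg (by omega)]
      exact ⟨by rw [gP, gRec_clamp k _ s (Or.inr hbig)], hinv⟩
    · have hdisj := hinv.2.2 (j+1) (by omega) hj s (by omega) (by omega)
      have hnn := gRec_nonneg k (nums.take (j+1)).reverse s
      by_cases hc : PySem.List.pyGetD (dp.getD (j+1) []) s 0 < 0
      · -- memo miss: recurse
        have hnum : PySem.List.pyGetD nums (j : Int) 0 = nums[j] := by
          rw [PySem.List.pyGetD_natCast]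
          exact List.getD_eq_getElem _ _ hjlen
        obtain ⟨ih1, hinv1⟩ := ih (by omega) s dp hinv
        obtain ⟨ih2, hinv2⟩ := ih (by omega) (s - nums[j]) _ hinv1
        rw [aRec]; simp only [if_neg hneg, if_pos hc, hnum]
        have hv : (aRec nums j s dp).1 +
            (aRec nums j (s - nums[j]) (aRec nums j s dp).2).1
              = gP k (nums.take (j+1)) s := by
          rw [List.take_succ_eq_append_getElem hjlen, gP_snoc, if_neg (by omega), ih1, ih2]
        refine ⟨hv, ?_⟩
        set dp2 := (aRec nums j (s - nums[j]) (aRec nums j s dp).2).2 with hdp2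
        set v := (aRec nums j s dp).1 + (aRec nums j (s - nums[j]) (aRec nums j s dp).2).1
          with hvdef
        refine ⟨?_, ?_, ?_⟩
        · intro i hi
          by_cases hieq : i = j + 1
          · subst hieq
            rw [getD_set_self]
            split
            · rw [List.length_set]; exact hinv2.1 _ hi
            · exact hinv2.1 _ hi
          · rw [getD_set_ne _ _ _ _ _ (fun hx => hieq hx.symm)]
            exact hinv2.1 _ hi
        · intro s' hs'
          rw [getD_set_ne _ _ _ _ _ (by omega)]
          exact hinv2.2.1 s' hs'
        · intro i h1 h2 s' hs0' hsk'
          by_cases hieq : i = j + 1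
          · subst hieq
            rw [PySem.List.pyGetD_of_nonneg _ _ hs0', getD_set_self]
            by_cases hlt : j + 1 < dp2.length
            · rw [if_pos hlt, List.getD_eq_getElem?_getD, List.getElem?_set]
              by_cases heq2 : s.toNat = s'.toNat
              · have hss' : s' = s := by omega
                by_cases hlen2 : s.toNat < (dp2.getD (j+1) []).length
                · rw [if_pos heq2, if_pos hlen2, Option.getD_some]
                  right; rw [hss']; exact hv
                · rw [if_pos heq2, if_neg hlen2, Option.getD_none]
                  have hold := hinv2.2.2 (j+1) h1 h2 s' hs0' hsk'
                  rw [PySem.List.pyGetD_of_nonneg _ _ hs0', List.getD_eq_getElem?_getD,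
                    List.getElem?_eq_none (by omega), Option.getD_none] at hold
                  exact hold
              · rw [if_neg heq2, ← List.getD_eq_getElem?_getD]
                have hold := hinv2.2.2 (j+1) h1 h2 s' hs0' hsk'
                rwa [PySem.List.pyGetD_of_nonneg _ _ hs0'] at hold
            · rw [if_neg hlt]
              have hold := hinv2.2.2 (j+1) h1 h2 s' hs0' hsk'
              rwa [PySem.List.pyGetD_of_nonneg _ _ hs0'] at hold
          · rw [getD_set_ne _ _ _ _ _ (fun hx => hieq hx.symm)]
            exact hinv2.2.2 i h1 h2 s' hs0' hsk'
      · -- memo hit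
        rw [aRec]; simp only [if_neg hneg, if_neg hc]
        rcases hdisj with hm1 | hval
        · omega
        · exact ⟨by rw [hval, gP], hinv⟩

lemma a_fold (nums : List Int) (k : Int) (hk : 0 ≤ k) :
    ∀ (l : List Int), ∀ (acc : Int) (dp : List (List Int)), AInv nums k dp →
      (l.foldl (fun (acc : Int × List (List Int)) i =>
          (acc.1 + (aRec nums nums.length i acc.2).1, (aRec nums nums.length i acc.2).2))
        (acc, dp)).1
        = acc + (l.map (fun i => gP k nums i)).sum := by
  intro l
  induction l with
  | nil => intro acc dp _; simp
  | cons i rest ih =>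
    intro acc dp hinv
    obtain ⟨h1, h2⟩ := aRec_correct nums k hk nums.length (le_refl _) i dp hinv
    rw [List.take_length] at h1
    simp only [List.foldl_cons, List.map_cons, List.sum_cons]
    rw [ih _ _ h2, h1]
    ring

-- the B-side slice cnt[:k] keeps exactly the columns 0..k-1
lemma slice_map_pyRange (k : Int) (hk : 0 ≤ k) (f : Int → Int) :
    PySem.List.slice ((PySem.List.pyRange 0 (k+1) 1).map f) none (some k)
      = (PySem.List.pyRange 0 k 1).map f := by
  rw [PySem.List.slice_to,
    PySem.List.pyRange_one_succ_right hk, List.map_append,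
    List.take_append_of_le_length (by
      rw [List.length_map, PySem.List.length_pyRange_one]; omega),
    List.take_of_length_le (by rw [List.length_map, PySem.List.length_pyRange_one]; omega)]
  exact hk

-- ===== VERDICT (by name: the statement is the Claim_ definition above) =====
theorem countPartitions2_spec : Claim_equal_countPartitions2 := by
  intro nums k _ hpre
  obtain ⟨hk, -⟩ := hpre
  unfold Spec_countPartitions2
  simp only [countPartitions2, countPartitions2_alt]
  rw [a_fold nums k hk (PySem.List.pyRange 0 k 1) 0 _ (aInv_init nums k hk)]
  rw [b_cnt0 k hk]
  rw [show (nums.foldl (fun c num =>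
      (PySem.List.pyRange 0 (k+1) 1).map (fun s =>
        PySem.List.pyGetD c s 0 +
        (if 0 ≤ s - num ∧ s - num ≤ k then PySem.List.pyGetD c (s - num) 0 else 0)))
      ((PySem.List.pyRange 0 (k+1) 1).map (fun t => gP k [] t)))
      = (PySem.List.pyRange 0 (k+1) 1).map (fun t => gP k ([] ++ nums) t)
    from b_loop k nums []]
  rw [List.nil_append, slice_map_pyRange k hk]
  ring_nf
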